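-- pv_equiv track=rewrite | github.com/haagbard/aoc2023 | day13/day13_2.py | scan_horizontal
-- ===== SOURCE A (Python) =====
-- def scan_horizontal(pattern, col_to_skip, original_hor_score):
--     match_indexes = []
--     for index in range(1, len(pattern[0])):
--         prev_line = ''
--         line = ''
--         for tmp_line in pattern:
--             prev_line += tmp_line[index - 1]
--             line += tmp_line[index]
--         if prev_line == line and index != original_hor_score:
--             match_indexes.append(index)
--
--     # See if they can match all the way to either end
--     for index in match_indexes:
--         end_found = False
--         all_match = True
--         counter = 0
--         while end_found == False:
--             if index - counter == 0:
--                 end_found = True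
--             elif index + counter == len(pattern[0]):
--                 end_found = True
--             else:
--                 prev_x = index - counter - 1
--                 next_x = index + counter
--                 if prev_x != col_to_skip and next_x != col_to_skip:
--                     prev_line = ''
--                     next_line = ''
--                     for tmp_line in pattern:
--                         prev_line += tmp_line[prev_x]
--                         next_line += tmp_line[next_x]
--                     if prev_line != next_line:
--                         all_match = False
--                         break
--             counter += 1
--         if all_match:
--             return index
--
--     return -1
-- ===== SOURCE B (Python) =====
-- def scan_horizontal(pattern, col_to_skip, original_hor_score):
--     w = len(pattern[0])
--     cols = [''.join(row[j] for row in pattern) for j in range(w)]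
--     key = [cols.index(c) for c in cols]  # intern each column as the index of its first occurrence
--     for i in range(1, w):
--         if i == original_hor_score:
--             continue
--         m = min(i, w - i)
--         ok = True
--         for j in range(m):  # outside-in: j = 0 is the outermost pair, j = m-1 the centre pair
--             l, r = i - m + j, i + m - 1 - j
--             if key[l] != key[r] and (j == m - 1 or (l != col_to_skip and r != col_to_skip)):
--                 ok = False
--                 break
--         if ok:
--             return i
--     return -1
-- ===== Notes on version B (the rewrite author's own statement) =====
-- stated objective: alternative
-- what changed: B interns every column as the index of its first occurrence (cols.index) and then, in one pass over all split points (no candidate list, no while-counter expansion), verifies each split by scanning its mirror window outside-in over the interned ids, excusing mismatched pairs that touch col_to_skip except the centre pair; Pre_ excludes ragged patterns (rows shorter than the first): there A either raises or, when its first row has <2 chars, returns -1 without indexing the other rows, while B's column/intern table construction itself raises.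
-- outside the precondition, e.g. on scan_horizontal(['#', ''], 0, 0): A returns -1, B raises IndexError
import Mathlib
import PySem

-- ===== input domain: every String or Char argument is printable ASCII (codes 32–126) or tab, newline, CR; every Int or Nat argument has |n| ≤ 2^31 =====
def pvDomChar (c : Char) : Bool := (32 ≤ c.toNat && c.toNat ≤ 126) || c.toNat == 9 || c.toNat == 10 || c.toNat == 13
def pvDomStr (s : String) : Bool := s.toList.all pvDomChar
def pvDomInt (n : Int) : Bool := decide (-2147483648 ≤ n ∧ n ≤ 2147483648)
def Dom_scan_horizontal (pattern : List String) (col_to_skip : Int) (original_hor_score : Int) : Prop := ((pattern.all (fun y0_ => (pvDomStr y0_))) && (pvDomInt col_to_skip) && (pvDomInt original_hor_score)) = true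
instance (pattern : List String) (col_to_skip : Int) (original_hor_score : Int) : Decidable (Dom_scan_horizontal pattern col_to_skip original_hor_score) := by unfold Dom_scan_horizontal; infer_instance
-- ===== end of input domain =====

-- B interns each column as the index of its first occurrence and tests every split point in one
-- pass by scanning the mirror window outside-in over the interned ids (excusing skip-column pairs,
-- except the centre pair), instead of A's candidate-list-then-while-counter outward expansion that
-- rebuilds columns char by char (objective: alternative).


-- ===== PORT A =====
-- prev_line/line built char by char over the rows in one loop, as a pair of accumulators.
-- tmp_line[x] is PySem.Str.pyGet?; the `.getD ' '` default is never reached under Pre_ (indices in range).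
def pvPairA (pattern : List String) (a b : Int) : List Char × List Char :=
  pattern.foldl
    (fun acc tmp =>
      (acc.1 ++ [(PySem.Str.pyGet? tmp a).getD ' '], acc.2 ++ [(PySem.Str.pyGet? tmp b).getD ' ']))
    ([], [])

-- the `while end_found == False` loop; fuel bounds the iteration count (w+1 always suffices for
-- the indices A feeds it, proved below); counter is the loop variable.
def pvExpandA (pattern : List String) (col_to_skip w index : Int) : Nat → Int → Bool
  | 0, _ => true
  | fuel + 1, counter =>
    if index - counter = 0 then true
    else if index + counter = w then true
    else
      let prev_x := index - counter - 1
      let next_x := index + counter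
      if prev_x ≠ col_to_skip ∧ next_x ≠ col_to_skip then
        let p := pvPairA pattern prev_x next_x
        if p.1 ≠ p.2 then false
        else pvExpandA pattern col_to_skip w index fuel (counter + 1)
      else pvExpandA pattern col_to_skip w index fuel (counter + 1)

-- the second `for index in match_indexes` loop: first index whose expansion matches all the way, else -1
def pvFindA (pattern : List String) (col_to_skip w : Int) : List Int → Int
  | [] => -1
  | i :: rest =>
    if pvExpandA pattern col_to_skip w i (w.toNat + 1) 0 then i
    else pvFindA pattern col_to_skip w rest

def scan_horizontal (pattern : List String) (col_to_skip : Int) (original_hor_score : Int) : Int :=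
  -- len(pattern[0]); pattern[0] raises on empty pattern (excluded by Pre_), `.getD ""` stands for that
  let w : Int := PySem.Str.len ((PySem.List.pyGet? pattern 0).getD "")
  let match_indexes :=
    (PySem.List.pyRange 1 w 1).foldl
      (fun acc index =>
        let p := pvPairA pattern (index - 1) index
        if p.1 = p.2 ∧ index ≠ original_hor_score then acc ++ [index] else acc)
      []
  pvFindA pattern col_to_skip w match_indexes

-- ===== PORT B =====
-- one column of the pattern as its list of characters (''.join(row[j] for row in pattern))
def pvColB (pattern : List String) (j : Int) : List Char :=
  pattern.map (fun row => (PySem.Str.pyGet? row j).getD ' ')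

-- the inner `for j in range(m)` loop with its break: mismatching interned ids fail the split
-- unless the pair touches col_to_skip and is not the centre pair
def pvInnerB (key : List Int) (cts i m : Int) : List Int → Bool
  | [] => true
  | j :: rest =>
    let l := i - m + j
    let r := i + m - 1 - j
    if PySem.List.pyGetD key l 0 ≠ PySem.List.pyGetD key r 0 ∧ (j = m - 1 ∨ (l ≠ cts ∧ r ≠ cts))
    then false
    else pvInnerB key cts i m rest

-- the outer `for i in range(1, w)` loop: skip i == original_hor_score, return the first i whose
-- whole mirror window checks out, else -1
def pvLoopB (key : List Int) (cts ohs w : Int) : List Int → Int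
  | [] => -1
  | i :: rest =>
    if i = ohs then pvLoopB key cts ohs w rest
    else if pvInnerB key cts i (min i (w - i)) (PySem.List.pyRange 0 (min i (w - i)) 1) then i
    else pvLoopB key cts ohs w rest

def scan_horizontal_alt (pattern : List String) (col_to_skip : Int) (original_hor_score : Int) : Int :=
  let w : Int := PySem.Str.len ((PySem.List.pyGet? pattern 0).getD "")
  let cols := (PySem.List.pyRange 0 w 1).map (pvColB pattern)
  -- key = [cols.index(c) for c in cols]
  let key := cols.map (fun c => (((PySem.List.index? cols c).getD 0 : Nat) : Int))
  pvLoopB key col_to_skip original_hor_score w (PySem.List.pyRange 1 w 1)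

-- ===== PRECONDITION & SPEC =====
-- pattern nonempty (pattern[0] raises IndexError on []) and every row at least as long as the
-- first: both programs index every row at columns 0..len(pattern[0])-1. Pre_ also excludes ragged
-- patterns whose first row has < 2 characters, where A returns -1 without ever indexing the other
-- rows while B's up-front column/intern table construction raises IndexError (B raises there, so
-- these inputs are excluded rather than stated as a difference).
def Pre_scan_horizontal (pattern : List String) (col_to_skip : Int) (original_hor_score : Int) : Prop :=
  pattern ≠ [] ∧ ∀ s ∈ pattern, PySem.Str.len (pattern.headD "") ≤ PySem.Str.len s
instance (pattern : List String) (col_to_skip : Int) (original_hor_score : Int) : Decidable (Pre_scan_horizontal pattern col_to_skip original_hor_score) := by unfold Pre_scan_horizontal; infer_instance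

def pvWitness_scan_horizontal : List String × Int × Int := (["##.#.", "#..#.", "##.#."], 4, 0)

def Spec_scan_horizontal (pattern : List String) (col_to_skip : Int) (original_hor_score : Int) (out : Int) : Prop := out = scan_horizontal_alt pattern col_to_skip original_hor_score
instance (pattern : List String) (col_to_skip : Int) (original_hor_score : Int) (out : Int) : Decidable (Spec_scan_horizontal pattern col_to_skip original_hor_score out) := by unfold Spec_scan_horizontal; infer_instance

-- ===== CLAIM (what is proved, stated in full; the proofs are below) =====
def Claim_equal_scan_horizontal : Prop := ∀ (pattern : List String) (col_to_skip : Int) (original_hor_score : Int), Dom_scan_horizontal pattern col_to_skip original_hor_score → Pre_scan_horizontal pattern col_to_skip original_hor_score → Spec_scan_horizontal pattern col_to_skip original_hor_score (scan_horizontal pattern col_to_skip original_hor_score)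

-- ===== LEMMAS AND PROOFS =====

-- the paired accumulator loop of A builds exactly the two mapped columns
theorem pvPairA_eq (pattern : List String) (a b : Int) :
    pvPairA pattern a b = (pvColB pattern a, pvColB pattern b) := by
  suffices h : ∀ (l : List String) (acc1 acc2 : List Char),
      l.foldl (fun acc tmp =>
          (acc.1 ++ [(PySem.Str.pyGet? tmp a).getD ' '], acc.2 ++ [(PySem.Str.pyGet? tmp b).getD ' '])) (acc1, acc2)
        = (acc1 ++ l.map (fun row => (PySem.Str.pyGet? row a).getD ' '),
           acc2 ++ l.map (fun row => (PySem.Str.pyGet? row b).getD ' ')) by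
    simpa [pvPairA, pvColB] using h pattern [] []
  intro l
  induction l with
  | nil => intro acc1 acc2; simp
  | cons x xs ih =>
    intro acc1 acc2
    rw [List.foldl_cons, ih]
    simp

-- B's interned id of column j (what key[j] holds)
def pvIdOf (pattern : List String) (w j : Int) : Int :=
  (((PySem.List.index? ((PySem.List.pyRange 0 w 1).map (pvColB pattern)) (pvColB pattern j)).getD 0 : Nat) : Int)

-- key[j] for an in-range j is the interned id of column j
theorem key_get (pattern : List String) (w j : Int) (h0 : 0 ≤ j) (hw : j < w) :
    PySem.List.pyGetD
      (((PySem.List.pyRange 0 w 1).map (pvColB pattern)).map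
        (fun c => (((PySem.List.index? ((PySem.List.pyRange 0 w 1).map (pvColB pattern)) c).getD 0 : Nat) : Int)))
      j 0 = pvIdOf pattern w j := by
  rw [List.map_map]
  exact PySem.List.pyGetD_map_pyRange_of_nonneg _ w j 0 h0 hw

-- interning is injective: equal ids ↔ equal columns
theorem id_inj (pattern : List String) (w a b : Int)
    (ha0 : 0 ≤ a) (haw : a < w) (hb0 : 0 ≤ b) (hbw : b < w) :
    pvIdOf pattern w a = pvIdOf pattern w b ↔ pvColB pattern a = pvColB pattern b := by
  constructor
  · intro h
    set cols := (PySem.List.pyRange 0 w 1).map (pvColB pattern) with hcols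
    have hma : pvColB pattern a ∈ cols := by
      rw [hcols]
      exact List.mem_map_of_mem (by rw [PySem.List.mem_pyRange_one]; omega)
    have hmb : pvColB pattern b ∈ cols := by
      rw [hcols]
      exact List.mem_map_of_mem (by rw [PySem.List.mem_pyRange_one]; omega)
    obtain ⟨ka, hka⟩ := Option.isSome_iff_exists.mp ((PySem.List.index?_isSome_iff _ _).mpr hma)
    obtain ⟨kb, hkb⟩ := Option.isSome_iff_exists.mp ((PySem.List.index?_isSome_iff _ _).mpr hmb)
    obtain ⟨hla, hgeta, -⟩ := PySem.List.getElem_of_index?_eq_some hka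
    obtain ⟨hlb, hgetb, -⟩ := PySem.List.getElem_of_index?_eq_some hkb
    unfold pvIdOf at h
    rw [← hcols, hka, hkb] at h
    simp only [Option.getD_some, Int.natCast_inj] at h
    rw [← hgeta, ← hgetb]
    congr 1
  · intro h
    unfold pvIdOf
    rw [h]

-- A's while-counter expansion is the bounded ∀ over its remaining pairs
theorem pvExpandA_forall (pattern : List String) (cts w i : Int) (hi : 1 ≤ i) (hiw : i < w) :
    ∀ (fuel : Nat) (c : Int), 0 ≤ c → c ≤ min i (w - i) →
      (min i (w - i) - c).toNat < fuel →
      (pvExpandA pattern cts w i fuel c = true ↔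
        ∀ k, c ≤ k → k < min i (w - i) →
          (i - k - 1 = cts ∨ i + k = cts ∨ pvColB pattern (i - k - 1) = pvColB pattern (i + k))) := by
  intro fuel
  induction fuel with
  | zero => intro c _ _ hf; omega
  | succ n ih =>
    intro c h0 h1 hf
    by_cases hc0 : i - c = 0
    · simp only [pvExpandA, hc0]
      constructor
      · intro _ k hk1 hk2; omega
      · intro _; rfl
    · by_cases hcw : i + c = w
      · simp only [pvExpandA, hc0, hcw]
        constructor
        · intro _ k hk1 hk2; omega
        · intro _; simp
      · have hclt : c < min i (w - i) := by omega
        have hrec := ih (c + 1) (by omega) (by omega) (by omega)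
        simp only [pvExpandA, if_neg hc0, if_neg hcw, pvPairA_eq]
        by_cases hsk : i - c - 1 ≠ cts ∧ i + c ≠ cts
        · rw [if_pos hsk]
          by_cases heq : pvColB pattern (i - c - 1) = pvColB pattern (i + c)
          · rw [if_neg (by simpa using heq), hrec]
            constructor
            · intro h k hk1 hk2
              by_cases hkc : k = c
              · subst hkc; right; right; exact heq
              · exact h k (by omega) hk2
            · intro h k hk1 hk2; exact h k (by omega) hk2
          · rw [if_pos (by simpa using heq)]
            constructor
            · intro h; exact absurd h (by simp)
            · intro h
              rcases h c (le_refl c) hclt with h1 | h1 | h1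
              · exact absurd h1 hsk.1
              · exact absurd h1 hsk.2
              · exact absurd h1 heq
        · rw [if_neg hsk, hrec]
          constructor
          · intro h k hk1 hk2
            by_cases hkc : k = c
            · subst hkc
              rcases Decidable.not_and_iff_or_not.mp hsk with h1 | h1
              · left; exact Decidable.not_not.mp h1
              · right; left; exact Decidable.not_not.mp h1
            · exact h k (by omega) hk2
          · intro h k hk1 hk2; exact h k (by omega) hk2

-- pvInnerB returns true iff no element of its list is a fatal mismatch
theorem pvInnerB_forall (key : List Int) (cts i m : Int) :
    ∀ L : List Int,
      (pvInnerB key cts i m L = true ↔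
        ∀ j ∈ L, ¬(PySem.List.pyGetD key (i - m + j) 0 ≠ PySem.List.pyGetD key (i + m - 1 - j) 0 ∧
                    (j = m - 1 ∨ (i - m + j ≠ cts ∧ i + m - 1 - j ≠ cts)))) := by
  intro L
  induction L with
  | nil => simp [pvInnerB]
  | cons j rest ih =>
    simp only [pvInnerB, List.mem_cons]
    by_cases hbad : PySem.List.pyGetD key (i - m + j) 0 ≠ PySem.List.pyGetD key (i + m - 1 - j) 0 ∧
        (j = m - 1 ∨ (i - m + j ≠ cts ∧ i + m - 1 - j ≠ cts))
    · rw [if_pos hbad]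
      constructor
      · intro h; exact absurd h (by simp)
      · intro h; exact absurd hbad (h j (Or.inl rfl))
    · rw [if_neg hbad, ih]
      constructor
      · intro h x hx
        rcases hx with hx | hx
        · subst hx; exact hbad
        · exact h x hx
      · intro h x hx; exact h x (Or.inr hx)

-- B's whole-window check for a split i equals "centre pair equal ∧ every pair excused or equal"
theorem innerB_char (pattern : List String) (cts w i : Int) (hi : 1 ≤ i) (hiw : i < w) :
    (pvInnerB
        (((PySem.List.pyRange 0 w 1).map (pvColB pattern)).map
          (fun c => (((PySem.List.index? ((PySem.List.pyRange 0 w 1).map (pvColB pattern)) c).getD 0 : Nat) : Int)))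
        cts i (min i (w - i)) (PySem.List.pyRange 0 (min i (w - i)) 1) = true) ↔
      (pvColB pattern (i - 1) = pvColB pattern i ∧
        ∀ k, 0 ≤ k → k < min i (w - i) →
          (i - k - 1 = cts ∨ i + k = cts ∨ pvColB pattern (i - k - 1) = pvColB pattern (i + k))) := by
  set m := min i (w - i) with hm
  have hm1 : 1 ≤ m := by omega
  rw [pvInnerB_forall]
  have hstep : ∀ j, 0 ≤ j → j < m →
      ((PySem.List.pyGetD
          (((PySem.List.pyRange 0 w 1).map (pvColB pattern)).map
            (fun c => (((PySem.List.index? ((PySem.List.pyRange 0 w 1).map (pvColB pattern)) c).getD 0 : Nat) : Int)))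
          (i - m + j) 0 = PySem.List.pyGetD
          (((PySem.List.pyRange 0 w 1).map (pvColB pattern)).map
            (fun c => (((PySem.List.index? ((PySem.List.pyRange 0 w 1).map (pvColB pattern)) c).getD 0 : Nat) : Int)))
          (i + m - 1 - j) 0) ↔ pvColB pattern (i - m + j) = pvColB pattern (i + m - 1 - j)) := by
    intro j hj0 hjm
    rw [key_get pattern w (i - m + j) (by omega) (by omega),
        key_get pattern w (i + m - 1 - j) (by omega) (by omega)]
    exact id_inj pattern w _ _ (by omega) (by omega) (by omega) (by omega)
  constructor
  · intro h
    constructor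
    · have := h (m - 1) (by rw [PySem.List.mem_pyRange_one]; omega)
      rw [not_and_or, Decidable.not_not, hstep (m - 1) (by omega) (by omega)] at this
      rcases this with h1 | h1
      · have e1 : i - m + (m - 1) = i - 1 := by ring
        have e2 : i + m - 1 - (m - 1) = i := by ring
        rw [e1, e2] at h1; exact h1
      · exact absurd (Or.inl rfl) h1
    · intro k hk0 hkm
      have hj := h (m - 1 - k) (by rw [PySem.List.mem_pyRange_one]; omega)
      rw [not_and_or, Decidable.not_not, hstep (m - 1 - k) (by omega) (by omega)] at hj
      have e1 : i - m + (m - 1 - k) = i - k - 1 := by ring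
      have e2 : i + m - 1 - (m - 1 - k) = i + k := by ring
      rw [e1, e2] at hj
      rcases hj with h1 | h1
      · right; right; exact h1
      · rw [not_or, not_and_or, Decidable.not_not, Decidable.not_not] at h1
        rcases h1.2 with h2 | h2
        · left; exact h2.symm ▸ rfl
        · right; left; exact h2.symm ▸ rfl
  · intro ⟨hctr, hall⟩ j hj
    rw [PySem.List.mem_pyRange_one] at hj
    rw [not_and_or, Decidable.not_not, hstep j (by omega) (by omega)]
    have e1 : i - m + j = i - (m - 1 - j) - 1 := by ring
    have e2 : i + m - 1 - j = i + (m - 1 - j) := by ring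
    rcases hall (m - 1 - j) (by omega) (by omega) with h1 | h1 | h1
    · by_cases hjc : j = m - 1
      · left
        have : i - (m - 1 - j) - 1 = i - 1 := by omega
        rw [e1, this, hjc]
        have : i + m - 1 - (m - 1) = i := by ring
        rw [e2, hjc, this] at *
        simpa [hjc] using hctr
      · right; rw [not_or]
        exact ⟨hjc, by rw [not_and_or, Decidable.not_not]; left; rw [e1]; exact h1⟩
    · by_cases hjc : j = m - 1
      · left
        have e3 : i + m - 1 - j = i := by rw [hjc]; ring
        have e4 : i - m + j = i - 1 := by rw [hjc]; ring
        rw [e3, e4]; exact hctr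
      · right; rw [not_or]
        exact ⟨hjc, by rw [not_and_or]; right; rw [e2]; exact fun hne => hne h1⟩
    · left; rw [e1, e2]; exact h1
  
-- A's first loop is a filter of range(1, w)
theorem matchIdx_eq (pattern : List String) (ohs w : Int) :
    (PySem.List.pyRange 1 w 1).foldl
      (fun acc index =>
        let p := pvPairA pattern (index - 1) index
        if p.1 = p.2 ∧ index ≠ ohs then acc ++ [index] else acc) []
    = (PySem.List.pyRange 1 w 1).filter
        (fun i => decide (pvColB pattern (i - 1) = pvColB pattern i ∧ i ≠ ohs)) := by
  have hfun : (fun (acc : List Int) index =>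
        let p := pvPairA pattern (index - 1) index
        if p.1 = p.2 ∧ index ≠ ohs then acc ++ [index] else acc)
      = (fun (acc : List Int) index =>
        if decide (pvColB pattern (index - 1) = pvColB pattern index ∧ index ≠ ohs) = true then
          acc ++ [index] else acc) := by
    funext acc index
    simp [pvPairA_eq]
  rw [hfun]
  simpa using PySem.List.foldl_append_if
    (fun i => decide (pvColB pattern (i - 1) = pvColB pattern i ∧ i ≠ ohs)) (fun i => i)
    (PySem.List.pyRange 1 w 1) []

-- B's single skipping loop equals A's scan of the filtered candidate list
theorem loop_eq (pattern : List String) (cts ohs w : Int) :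
    ∀ L : List Int, (∀ i ∈ L, 1 ≤ i ∧ i < w) →
      pvLoopB
        (((PySem.List.pyRange 0 w 1).map (pvColB pattern)).map
          (fun c => (((PySem.List.index? ((PySem.List.pyRange 0 w 1).map (pvColB pattern)) c).getD 0 : Nat) : Int)))
        cts ohs w L
      = pvFindA pattern cts w
          (L.filter (fun i => decide (pvColB pattern (i - 1) = pvColB pattern i ∧ i ≠ ohs))) := by
  set key := ((PySem.List.pyRange 0 w 1).map (pvColB pattern)).map
      (fun c => (((PySem.List.index? ((PySem.List.pyRange 0 w 1).map (pvColB pattern)) c).getD 0 : Nat) : Int))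
    with hkey
  intro L
  induction L with
  | nil => intro _; simp [pvLoopB, pvFindA]
  | cons i rest ih =>
    intro hmem
    have hi1 : 1 ≤ i := (hmem i (by simp)).1
    have hiw : i < w := (hmem i (by simp)).2
    have hrest := fun j hj => hmem j (List.mem_cons_of_mem _ hj)
    rw [pvLoopB]
    by_cases hohs : i = ohs
    · rw [if_pos hohs, List.filter_cons_of_neg (by simp [hohs]), ih hrest]
    · rw [if_neg hohs]
      have hchar := innerB_char pattern cts w i hi1 hiw
      rw [← hkey] at hchar
      by_cases hceq : pvColB pattern (i - 1) = pvColB pattern i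
      · rw [List.filter_cons_of_pos (by simp; tauto), pvFindA]
        have hexp := pvExpandA_forall pattern cts w i hi1 hiw (w.toNat + 1) 0 (by omega)
          (by omega) (by omega)
        by_cases hall : ∀ k, (0:Int) ≤ k → k < min i (w - i) →
            (i - k - 1 = cts ∨ i + k = cts ∨ pvColB pattern (i - k - 1) = pvColB pattern (i + k))
        · rw [if_pos (hchar.mpr ⟨hceq, hall⟩),
              if_pos (hexp.mpr (fun k hk1 hk2 => hall k hk1 hk2))]
        · have hb1 : pvInnerB key cts i (min i (w - i)) (PySem.List.pyRange 0 (min i (w - i)) 1) ≠ true := by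
            intro h; exact hall (hchar.mp h).2
          have hb2 : pvExpandA pattern cts w i (w.toNat + 1) 0 ≠ true := by
            intro h; exact hall (fun k hk1 hk2 => hexp.mp h k hk1 hk2)
          rw [if_neg hb1, if_neg hb2, ih hrest]
      · rw [List.filter_cons_of_neg (by simp; tauto)]
        have hb1 : pvInnerB key cts i (min i (w - i)) (PySem.List.pyRange 0 (min i (w - i)) 1) ≠ true := by
          intro h; exact hceq (hchar.mp h).1
        rw [if_neg hb1, ih hrest]

theorem scan_horizontal_eq (pattern : List String) (cts ohs : Int) :
    scan_horizontal pattern cts ohs = scan_horizontal_alt pattern cts ohs := by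
  simp only [scan_horizontal, scan_horizontal_alt]
  rw [matchIdx_eq pattern ohs (PySem.Str.len ((PySem.List.pyGet? pattern 0).getD ""))]
  exact (loop_eq pattern cts ohs _ (PySem.List.pyRange 1 _ 1)
    (fun i hi => by rw [PySem.List.mem_pyRange_one] at hi; omega)).symm

-- ===== VERDICT (by name: the statement is the Claim_ definition above) =====
theorem scan_horizontal_spec : Claim_equal_scan_horizontal := by
  intro pattern cts ohs _ _
  exact scan_horizontal_eq pattern cts ohs
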